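-- pv_equiv track=rewrite | github.com/AreebMughal/Sentiment-Analysis-ML-Project | test.py | is_consonant
-- ===== SOURCE A (Python) =====
-- vowels = frozenset(["a", "e", "i", "o", "u"])
--
-- def is_consonant(word, i):
--     """Returns True if word[i] is a consonant, False otherwise
--
--     A consonant is defined in the paper as follows:
--
--         A consonant in a word is a letter other than A, E, I, O or
--         U, and other than Y preceded by a consonant. (The fact that
--         the term `consonant' is defined to some extent in terms of
--         itself does not make it ambiguous.) So in TOY the consonants
--         are T and Y, and in SYZYGY they are S, Z and G. If a letter
--         is not a consonant it is a vowel.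
--     """
--     if word[i] in vowels:
--         return False
--     if word[i] == "y":
--         if i == 0:
--             return True
--         else:
--             return not is_consonant(word, i - 1)
--     return True
-- ===== SOURCE B (Python) =====
-- vowels = frozenset(["a", "e", "i", "o", "u"])
--
-- def is_consonant(word, i):
--     """Returns True if word[i] is a consonant, False otherwise (Porter rule)."""
--     c = word[i]
--     if c in vowels:
--         return False
--     if c != "y":
--         return True
--     # 'y' case: walk back over the consecutive run of 'y's ending at i,
--     # then combine the base truth value with the parity of the run length.
--     j = i
--     while j != 0 and word[j - 1] == "y":
--         j -= 1
--     base = j == 0 or word[j - 1] in vowels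
--     if (i - j) % 2 == 0:
--         return base
--     return not base
-- ===== Notes on version B (the rewrite author's own statement) =====
-- stated objective: alternative
-- what changed: Replaces A's recursion over the run of 'y's by a single explicit backward while loop that finds the start of the run, then computes the answer once from the base character and the parity of the run length.
import Mathlib
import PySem

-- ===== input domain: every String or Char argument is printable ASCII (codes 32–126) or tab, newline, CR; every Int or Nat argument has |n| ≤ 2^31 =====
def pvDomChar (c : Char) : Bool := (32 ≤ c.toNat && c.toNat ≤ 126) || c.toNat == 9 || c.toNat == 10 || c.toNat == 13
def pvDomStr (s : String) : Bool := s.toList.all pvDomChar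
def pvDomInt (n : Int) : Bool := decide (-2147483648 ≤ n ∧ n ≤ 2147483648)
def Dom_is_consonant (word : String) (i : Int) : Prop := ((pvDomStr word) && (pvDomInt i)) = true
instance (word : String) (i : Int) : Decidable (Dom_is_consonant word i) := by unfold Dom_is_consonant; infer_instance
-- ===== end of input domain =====

-- B replaces A's recursion over the 'y' run by one explicit backward walk plus a parity flip (objective: alternative decomposition, same cost).

def pvVowels : List Char := ['a', 'e', 'i', 'o', 'u']

-- index bounds from a successful lookup (used for termination of both ports)
theorem pv_some_bounds {word : String} {i : Int} {c : Char}
    (h : PySem.Str.pyGet? word i = some c) :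
    -(word.length : Int) ≤ i ∧ i < word.length := by
  have hne : PySem.Str.pyGet? word i ≠ none := by rw [h]; simp
  simp only [PySem.Str.pyGet?_eq, PySem.Chars.pyGet?_eq_listPyGet?] at hne
  rw [ne_eq, PySem.List.pyGet?_eq_none_iff, not_not] at hne
  simp only [PySem.Raise.InRange, String.length_toList] at hne
  omega

-- ===== PORT A =====
def is_consonant (word : String) (i : Int) : Bool :=
  match h : PySem.Str.pyGet? word i with
  | none => false   -- word[i] raises IndexError in Python; excluded by Pre_
  | some c =>
    if c ∈ pvVowels then false
    else if c = 'y' then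
      if i = 0 then true
      else !(is_consonant word (i - 1))
    else true
termination_by (i + word.length + 1).toNat
decreasing_by
  have := pv_some_bounds h
  omega

-- ===== PORT B =====
-- the backward while loop of Source B: walk j down over the run of 'y's
def altWalk (word : String) (j : Int) : Int :=
  if h : j ≠ 0 ∧ PySem.Str.pyGet? word (j - 1) = some 'y' then altWalk word (j - 1)
  else j
termination_by (j + word.length).toNat
decreasing_by
  have := pv_some_bounds h.2
  omega

-- 'word[j-1] in vowels' (a raising lookup is outside Pre_)
def pvIsVowelAt (word : String) (k : Int) : Bool :=
  match PySem.Str.pyGet? word k with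
  | some c => c ∈ pvVowels
  | none => false

def is_consonant_alt (word : String) (i : Int) : Bool :=
  match PySem.Str.pyGet? word i with
  | none => false   -- word[i] raises IndexError in Python; excluded by Pre_
  | some c =>
    if c ∈ pvVowels then false
    else if c ≠ 'y' then true
    else
      let j := altWalk word i
      let base : Bool := (j == 0) || pvIsVowelAt word (j - 1)
      if (i - j) % 2 = 0 then base else !base

-- ===== PRECONDITION & SPEC =====
-- Pre_ excludes exactly the inputs where A raises IndexError: an index outside
-- [-len, len), and a negative index whose whole prefix word[0..i+len] is 'y'
-- (there A's recursion walks below -len and raises).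
def Pre_is_consonant (word : String) (i : Int) : Prop :=
  -(word.length : Int) ≤ i ∧ i < word.length ∧
  (i < 0 → ¬ ((word.toList.take (i + word.length + 1).toNat).all (fun c => c = 'y') = true))
instance (word : String) (i : Int) : Decidable (Pre_is_consonant word i) := by
  unfold Pre_is_consonant; infer_instance

def pvWitness_is_consonant : String × Int := ("toy", 2)

def Spec_is_consonant (word : String) (i : Int) (out : Bool) : Prop := out = is_consonant_alt word i
instance (word : String) (i : Int) (out : Bool) : Decidable (Spec_is_consonant word i out) := by unfold Spec_is_consonant; infer_instance

-- ===== CLAIM (what is proved, stated in full; the proofs are below) =====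
def Claim_equal_is_consonant : Prop := ∀ (word : String) (i : Int), Dom_is_consonant word i → Pre_is_consonant word i → Spec_is_consonant word i (is_consonant word i)

-- ===== LEMMAS AND PROOFS =====

-- a successful lookup exists at every in-range index
theorem pv_valid_some (word : String) (i : Int)
    (h1 : -(word.length : Int) ≤ i) (h2 : i < word.length) :
    ∃ c, PySem.Str.pyGet? word i = some c := by
  cases hc : PySem.Str.pyGet? word i with
  | some c => exact ⟨c, rfl⟩
  | none =>
    exfalso
    simp only [PySem.Str.pyGet?_eq, PySem.Chars.pyGet?_eq_listPyGet?] at hc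
    rw [PySem.List.pyGet?_eq_none_iff] at hc
    simp only [PySem.Raise.InRange, String.length_toList] at hc
    omega

-- negative-index lookup as a list access
theorem pv_get_neg (word : String) (i : Int)
    (h1 : -(word.length : Int) ≤ i) (h2 : i < 0) :
    PySem.Str.pyGet? word i = word.toList[(i + word.length).toNat]? := by
  have hk : i = -(((-i).toNat : Nat) : Int) := by omega
  rw [hk]
  simp only [PySem.Str.pyGet?_eq, PySem.Chars.pyGet?_eq_listPyGet?]
  rw [PySem.List.pyGet?_neg_natCast word.toList (-i).toNat (by omega)
      (by simp only [String.length_toList]; omega)]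
  congr 1
  simp only [String.length_toList]
  omega

-- reductions of B's port at each kind of character
theorem pv_alt_vowel (word : String) (i : Int) (c : Char)
    (hc : PySem.Str.pyGet? word i = some c) (hv : c ∈ pvVowels) :
    is_consonant_alt word i = false := by
  unfold is_consonant_alt
  rw [hc]
  simp [hv]

theorem pv_alt_other (word : String) (i : Int) (c : Char)
    (hc : PySem.Str.pyGet? word i = some c) (hv : c ∉ pvVowels) (hy : c ≠ 'y') :
    is_consonant_alt word i = true := by
  unfold is_consonant_alt
  rw [hc]
  simp [hv, hy]

theorem pv_alt_y (word : String) (i : Int)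
    (hy : PySem.Str.pyGet? word i = some 'y') :
    is_consonant_alt word i =
      (if (i - altWalk word i) % 2 = 0 then
        ((altWalk word i == 0) || pvIsVowelAt word (altWalk word i - 1))
       else !((altWalk word i == 0) || pvIsVowelAt word (altWalk word i - 1))) := by
  unfold is_consonant_alt
  rw [hy]
  simp [pvVowels]

-- Pre_ is preserved along A's recursion over a 'y'
theorem pv_pre_step (word : String) (i : Int)
    (hp : Pre_is_consonant word i)
    (hy : PySem.Str.pyGet? word i = some 'y') (hi0 : i ≠ 0) :
    Pre_is_consonant word (i - 1) := by
  obtain ⟨h1, h2, h3⟩ := hp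
  by_cases hpos : 0 < i
  · refine ⟨by omega, by omega, ?_⟩
    intro hneg; omega
  · -- i < 0
    have hneg : i < 0 := by omega
    have hchar : word.toList[(i + word.length).toNat]? = some 'y' := by
      rw [← pv_get_neg word i h1 hneg]; exact hy
    set k := (i + word.length).toNat with hkdef
    have hk1 : (i + word.length + 1).toNat = k + 1 := by omega
    have hall := h3 hneg
    rw [hk1] at hall
    have hklen : k < word.toList.length := by simp only [String.length_toList]; omega
    have hgy : word.toList[k] = 'y' := by
      have := List.getElem?_eq_getElem hklen
      rw [this] at hchar
      exact Option.some.inj hchar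
    have hsplit : word.toList.take (k + 1) = word.toList.take k ++ ['y'] := by
      rw [List.take_add_one]
      congr 1
      simp [List.getElem?_eq_getElem hklen, hgy]
    have hall' : ¬ ((word.toList.take k).all (fun c => c = 'y') = true) := by
      intro h
      apply hall
      rw [hsplit]
      simp [List.all_append, h]
    -- if i = -len then k = 0 and the all-'y' prefix is empty: contradiction
    have hne : -(word.length : Int) ≠ i := by
      intro heq
      apply hall'
      have hk0 : k = 0 := by omega
      simp [hk0]
    refine ⟨by omega, by omega, ?_⟩
    intro _
    have hk1' : (i - 1 + word.length + 1).toNat = k := by omega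
    rw [hk1']
    exact hall'

-- one flip of B per step of A's recursion over a 'y'
theorem pv_alt_flip (word : String) (i : Int)
    (hp : Pre_is_consonant word i)
    (hy : PySem.Str.pyGet? word i = some 'y') (hi0 : i ≠ 0) :
    is_consonant_alt word i = !(is_consonant_alt word (i - 1)) := by
  have hp' := pv_pre_step word i hp hy hi0
  obtain ⟨d, hd⟩ := pv_valid_some word (i - 1) hp'.1 hp'.2.1
  by_cases hdv : d ∈ pvVowels
  · -- previous char is a vowel: walk stops at i, base is true
    have hdy : d ≠ 'y' := by
      intro h; rw [h] at hdv; revert hdv; decide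
    have hw : altWalk word i = i := by
      rw [altWalk, dif_neg]
      intro h
      exact hdy (Option.some.inj (hd ▸ h.2))
    have hbv : pvIsVowelAt word (i - 1) = true := by
      unfold pvIsVowelAt
      rw [hd]
      simp [hdv]
    rw [pv_alt_y word i hy, pv_alt_vowel word (i - 1) d hd hdv, hw]
    simp [hbv]
  · by_cases hdy : d = 'y'
    · -- previous char is a 'y': same walk target, parities differ by one
      subst hdy
      have hw : altWalk word i = altWalk word (i - 1) := by
        rw [altWalk, dif_pos ⟨hi0, hd⟩]
      rw [pv_alt_y word i hy, pv_alt_y word (i - 1) hd, hw]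
      set j := altWalk word (i - 1) with hj
      set b : Bool := (j == 0 || pvIsVowelAt word (j - 1)) with hb
      by_cases hpar : (i - j) % 2 = 0
      · rw [if_pos hpar, if_neg (show ¬ (i - 1 - j) % 2 = 0 from by omega)]
        cases b <;> simp
      · rw [if_neg hpar, if_pos (show (i - 1 - j) % 2 = 0 from by omega)]
    · -- previous char is a non-'y' consonant: walk stops at i, base is false
      have hw : altWalk word i = i := by
        rw [altWalk, dif_neg]
        intro h
        exact hdy (Option.some.inj (hd ▸ h.2))
      have hbv : pvIsVowelAt word (i - 1) = false := by
        unfold pvIsVowelAt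
        rw [hd]
        simp [hdv]
      rw [pv_alt_y word i hy, pv_alt_other word (i - 1) d hd hdv hdy, hw]
      simp [hbv, hi0]

-- main equivalence, by induction on A's recursion depth
theorem pv_main (word : String) : ∀ (n : Nat) (i : Int),
    (i + word.length + 1).toNat ≤ n → Pre_is_consonant word i →
    is_consonant word i = is_consonant_alt word i := by
  intro n
  induction n with
  | zero =>
    intro i hn hp
    exfalso
    have h1 := hp.1
    omega
  | succ n ih =>
    intro i hn hp
    obtain ⟨c, hc⟩ := pv_valid_some word i hp.1 hp.2.1
    rw [is_consonant]
    split
    · next heq => rw [heq] at hc; exact absurd hc (by simp)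
    · next c' heq =>
      rw [heq] at hc
      injection hc with hc'
      subst hc'
      by_cases hv : c' ∈ pvVowels
      · rw [if_pos hv, pv_alt_vowel word i c' heq hv]
      · rw [if_neg hv]
        by_cases hcy : c' = 'y'
        · rw [if_pos hcy]
          subst hcy
          by_cases hi0 : i = 0
          · rw [if_pos hi0]
            subst hi0
            have hw : altWalk word 0 = 0 := by
              rw [altWalk, dif_neg]; simp
            rw [pv_alt_y word 0 heq, hw]
            simp
          · rw [if_neg hi0]
            have hp' := pv_pre_step word i hp heq hi0
            have hrec := ih (i - 1) (by omega) hp'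
            rw [hrec, pv_alt_flip word i hp heq hi0]
        · rw [if_neg hcy, pv_alt_other word i c' heq hv hcy]

-- ===== VERDICT (by name: the statement is the Claim_ definition above) =====
theorem is_consonant_spec : Claim_equal_is_consonant := by
  intro word i _ hp
  unfold Spec_is_consonant
  exact pv_main word (i + word.length + 1).toNat i (le_refl _) hp
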